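-- pv_equiv track=rewrite | github.com/the-shivers/advent_of_code | 2024/day4/solution.py | find_vertical_matches
-- ===== SOURCE A (Python) =====
-- def find_vertical_matches(lines, pattern):
--     counter = 0
--     for y in range(0, len(lines) - 3):
--         for x in range(0, len(lines[0])):
--             for p in [pattern, pattern[::-1]]:
--                 if (
--                     lines[y][x] == p[0] and
--                     lines[y + 1][x] == p[1] and
--                     lines[y + 2][x] == p[2] and
--                     lines[y + 3][x] == p[3]
--                 ):
--                     counter += 1
--     return counter
-- ===== SOURCE B (Python) =====
-- def find_vertical_matches(lines, pattern):
--     if len(lines) < 4: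
--         return 0
--     width = len(lines[0])
--     fwd = pattern[:4]
--     rev = pattern[::-1][:4]
--     counter = 0
--     for x in range(width):
--         col = ''.join(lines[y][x] for y in range(len(lines)))
--         for y in range(len(lines) - 3):
--             window = col[y:y + 4]
--             if window == fwd:
--                 counter += 1
--             if window == rev:
--                 counter += 1
--     return counter
-- ===== Notes on version B (the rewrite author's own statement) =====
-- stated objective: simpler
-- what changed: Instead of a triple loop testing four explicit character indices against both the pattern and its full reversal, B transposes the grid into column strings once, precomputes the first four chars of the pattern and of its reversal, and slides a 4-char window down each column comparing slices (the comparisons run in C, giving a large constant-factor speedup).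
-- outside the precondition, e.g. on find_vertical_matches(['1x', 'x1', '0', ''], '9 '): A returns 0, B raises IndexError; on find_vertical_matches(['AAA', 'AAA', 'AAA', 'ABA'], 'AB'): A returns 0, B returns 0; on find_vertical_matches(['SSS', 'SSS', 'SSS', 'SSS'], 'S'): A raises IndexError, B returns 0
import Mathlib
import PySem

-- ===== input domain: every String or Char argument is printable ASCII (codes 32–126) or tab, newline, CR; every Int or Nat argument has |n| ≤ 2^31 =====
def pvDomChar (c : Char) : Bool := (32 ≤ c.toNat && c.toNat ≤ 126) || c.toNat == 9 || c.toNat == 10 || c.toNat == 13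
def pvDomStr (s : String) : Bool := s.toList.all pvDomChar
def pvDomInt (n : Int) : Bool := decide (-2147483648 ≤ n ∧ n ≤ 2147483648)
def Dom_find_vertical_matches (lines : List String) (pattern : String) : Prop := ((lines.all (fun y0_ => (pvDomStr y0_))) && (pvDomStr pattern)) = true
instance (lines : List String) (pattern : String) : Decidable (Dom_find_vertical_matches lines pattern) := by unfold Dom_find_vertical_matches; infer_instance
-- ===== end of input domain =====

-- B replaces A's triple loop with explicit 4-index checks by a transpose-first structure:
-- build each column once, precompute the 4-char forward/reverse targets, and compare sliding windows.
-- Equality is about the RETURN value; neither program mutates its arguments.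

-- ===== PORT A =====
-- lines[y][x] : under Pre_ the indices are always in range, so the default is never reached.
def pvCharAtA (lines : List String) (y x : Int) : Char :=
  PySem.List.pyGetD (PySem.List.pyGetD lines y "").toList x (Char.ofNat 0)

def find_vertical_matches (lines : List String) (pattern : String) : Int :=
  -- pattern[::-1] is reversal (PySem.Str.slice?_none_none_neg_one); p[k] on code points
  let P := pattern.toList
  (PySem.List.pyRange 0 ((lines.length : Int) - 3) 1).foldl (fun counter y =>
    (PySem.List.pyRange 0 ((PySem.List.pyGetD lines 0 "").toList.length : Int) 1).foldl (fun counter x =>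
      [P, P.reverse].foldl (fun counter p =>
        if pvCharAtA lines y x = PySem.List.pyGetD p 0 (Char.ofNat 0) ∧
           pvCharAtA lines (y + 1) x = PySem.List.pyGetD p 1 (Char.ofNat 0) ∧
           pvCharAtA lines (y + 2) x = PySem.List.pyGetD p 2 (Char.ofNat 0) ∧
           pvCharAtA lines (y + 3) x = PySem.List.pyGetD p 3 (Char.ofNat 0)
        then counter + 1 else counter) counter) counter) 0

-- ===== PORT B =====
-- lines[y][x] for the column join; under Pre_ the indices are in range, default never reached.
def pvCharAtB (lines : List String) (y x : Int) : Char :=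
  PySem.List.pyGetD (PySem.List.pyGetD lines y "").toList x (Char.ofNat 0)

def find_vertical_matches_alt (lines : List String) (pattern : String) : Int :=
  if lines.length < 4 then 0
  else
    let fwd := PySem.List.slice pattern.toList none (some 4)
    let rev := PySem.List.slice pattern.toList.reverse none (some 4)
    (PySem.List.pyRange 0 ((PySem.List.pyGetD lines 0 "").toList.length : Int) 1).foldl (fun counter x =>
      let col := (PySem.List.pyRange 0 (lines.length : Int) 1).map (fun y => pvCharAtB lines y x)
      (PySem.List.pyRange 0 ((lines.length : Int) - 3) 1).foldl (fun counter y =>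
        let w := PySem.List.slice col (some y) (some (y + 4))
        let counter := if w = fwd then counter + 1 else counter
        if w = rev then counter + 1 else counter) counter) 0

-- ===== PRECONDITION & SPEC =====
-- Pre_ excludes the shapes on which an IndexError is possible: grids of height ≥ 4 with a nonempty
-- first row that are ragged (some row shorter than row 0; B's column join always raises there, A raises
-- or returns 0 depending on contents), and such grids with a pattern of fewer than 4 characters
-- (A raises or returns 0 depending on contents; B returns 0) — see the cites.
def Pre_find_vertical_matches (lines : List String) (pattern : String) : Prop :=
  lines.length < 4 ∨ (PySem.List.pyGetD lines 0 "").toList.length = 0 ∨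
    (4 ≤ pattern.toList.length ∧
      ∀ s ∈ lines, (PySem.List.pyGetD lines 0 "").toList.length ≤ s.toList.length)
instance (lines : List String) (pattern : String) : Decidable (Pre_find_vertical_matches lines pattern) := by unfold Pre_find_vertical_matches; infer_instance

def pvWitness_find_vertical_matches : List String × String :=
  (["XA", "MA", "AA", "SA"], "XMAS")

def Spec_find_vertical_matches (lines : List String) (pattern : String) (out : Int) : Prop := out = find_vertical_matches_alt lines pattern
instance (lines : List String) (pattern : String) (out : Int) : Decidable (Spec_find_vertical_matches lines pattern out) := by unfold Spec_find_vertical_matches; infer_instance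

-- ===== CLAIM (what is proved, stated in full; the proofs are below) =====
def Claim_equal_find_vertical_matches : Prop := ∀ (lines : List String) (pattern : String), Dom_find_vertical_matches lines pattern → Pre_find_vertical_matches lines pattern → Spec_find_vertical_matches lines pattern (find_vertical_matches lines pattern)

-- ===== LEMMAS AND PROOFS =====

-- A's per-cell test against one pattern direction, and its contribution as 0/1
def pvHit (lines : List String) (p : List Char) (y x : Int) : Int :=
  if pvCharAtA lines y x = PySem.List.pyGetD p 0 (Char.ofNat 0) ∧
     pvCharAtA lines (y + 1) x = PySem.List.pyGetD p 1 (Char.ofNat 0) ∧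
     pvCharAtA lines (y + 2) x = PySem.List.pyGetD p 2 (Char.ofNat 0) ∧
     pvCharAtA lines (y + 3) x = PySem.List.pyGetD p 3 (Char.ofNat 0)
  then 1 else 0

-- B's sliding window in column x at row y
def pvWin (lines : List String) (x y : Int) : List Char :=
  PySem.List.slice
    ((PySem.List.pyRange 0 (lines.length : Int) 1).map (fun y' => pvCharAtB lines y' x))
    (some y) (some (y + 4))

-- sum over two lists commutes
theorem pv_sum_sum_comm {α β : Type} (l1 : List α) (l2 : List β) (f : α → β → Int) :
    (l1.map (fun a => (l2.map (f a)).sum)).sum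
      = (l2.map (fun b => (l1.map (fun a => f a b)).sum)).sum := by
  induction l1 with
  | nil => simp
  | cons a t ih =>
      simp only [List.map_cons, List.sum_cons, ih]
      rw [← PySem.List.sum_map_add_int]

theorem pv_drop_map_pyRange {γ : Type} (f : Int → γ) (H k : Nat) (hk : k ≤ H) :
    ((PySem.List.pyRange 0 (H : Int) 1).map f).drop k
      = (PySem.List.pyRange (k : Int) (H : Int) 1).map f := by
  rw [PySem.List.pyRange_one_append 0 (k : Int) (H : Int) (by omega) (by omega)]
  rw [List.map_append, List.drop_append_of_le_length (by simp [PySem.List.length_pyRange_one])]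
  simp [PySem.List.length_pyRange_one]

-- a double fold that only adds is a double sum
theorem pv_double_foldl {α β : Type} (l1 : List α) (l2 : List β) (body : Int → α → β → Int)
    (g : α → β → Int) (h : ∀ c y x, body c y x = c + g y x) :
    l1.foldl (fun c y => l2.foldl (fun c x => body c y x) c) 0
      = (l1.map (fun y => (l2.map (g y)).sum)).sum := by
  have h2 : ∀ (y : α) (c : Int), l2.foldl (fun c x => body c y x) c = c + (l2.map (g y)).sum := by
    intro y c
    have he : (fun (c : Int) x => body c y x) = fun c x => c + (g y) x := by
      funext c x; exact h c y x
    rw [he, PySem.List.foldl_add]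
  calc l1.foldl (fun c y => l2.foldl (fun c x => body c y x) c) 0
      = l1.foldl (fun c y => c + (l2.map (g y)).sum) 0 := by
        congr 1; funext c y; exact h2 y c
    _ = 0 + (l1.map (fun y => (l2.map (g y)).sum)).sum :=
        PySem.List.foldl_add _ _ _
    _ = _ := by ring

-- the window equals the four column characters; comparing it to the 4-char target
-- is exactly A's four-conjunct test
theorem pv_hit_eq (lines : List String) (p : List Char) (hp : 4 ≤ p.length) (x y : Int)
    (hy0 : 0 ≤ y) (hy : y + 4 ≤ (lines.length : Int)) :
    pvHit lines p y x
      = (if pvWin lines x y = PySem.List.slice p none (some 4) then (1 : Int) else 0) := by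
  obtain ⟨a, b, c, d, r, hpe⟩ : ∃ a b c d r, p = a :: b :: c :: d :: r := by
    rcases p with _ | ⟨a, _ | ⟨b, _ | ⟨c, _ | ⟨d, r⟩⟩⟩⟩ <;>
      first
      | exact ⟨_, _, _, _, _, rfl⟩
      | simp at hp
  subst hpe
  have hfwd : PySem.List.slice (a :: b :: c :: d :: r) none (some 4) = [a, b, c, d] := by
    rw [PySem.List.slice_to _ (by omega)]; rfl
  have hwin : pvWin lines x y
      = [pvCharAtB lines y x, pvCharAtB lines (y + 1) x,
         pvCharAtB lines (y + 2) x, pvCharAtB lines (y + 3) x] := by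
    unfold pvWin
    rw [PySem.List.slice_toNat _ hy0 (by omega),
      show (y + 4).toNat - y.toNat = 4 by omega,
      pv_drop_map_pyRange _ lines.length y.toNat (by omega),
      show ((y.toNat : Nat) : Int) = y from Int.toNat_of_nonneg hy0,
      PySem.List.pyRange_one_append y (y + 4) (lines.length : Int) (by omega) (by omega),
      List.map_append,
      List.take_left' (by simp [PySem.List.length_pyRange_one]),
      PySem.List.pyRange_one_cons (by omega), PySem.List.pyRange_one_cons (by omega),
      PySem.List.pyRange_one_cons (by omega), PySem.List.pyRange_one_cons (by omega),
      PySem.List.pyRange_one_eq_nil (by omega)]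
    simp only [List.map_cons, List.map_nil]
    rw [show y + 1 + 1 + 1 = y + 3 from by ring, show y + 1 + 1 = y + 2 from by ring]
  rw [hfwd, hwin]
  unfold pvHit
  rw [PySem.List.pyGetD_ofNat', PySem.List.pyGetD_ofNat', PySem.List.pyGetD_ofNat',
    PySem.List.pyGetD_ofNat']
  refine if_congr ?_ rfl rfl
  simp [pvCharAtA, pvCharAtB]

-- the main case: height ≥ 4 and a pattern of at least 4 characters
theorem pv_main (lines : List String) (pattern : String)
    (hH4 : 4 ≤ lines.length) (hP : 4 ≤ pattern.toList.length) :
    find_vertical_matches lines pattern = find_vertical_matches_alt lines pattern := by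
  have hA : find_vertical_matches lines pattern
      = ((PySem.List.pyRange 0 ((lines.length : Int) - 3) 1).map (fun y =>
          ((PySem.List.pyRange 0 ((PySem.List.pyGetD lines 0 "").toList.length : Int) 1).map
            (fun x => pvHit lines pattern.toList y x
              + pvHit lines pattern.toList.reverse y x)).sum)).sum := by
    simp only [find_vertical_matches]
    refine pv_double_foldl _ _ _ _ ?_
    intro cc y x
    simp only [List.foldl_cons, List.foldl_nil, pvHit]
    split_ifs <;> ring
  have hB : find_vertical_matches_alt lines pattern
      = ((PySem.List.pyRange 0 ((PySem.List.pyGetD lines 0 "").toList.length : Int) 1).map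
          (fun x =>
            ((PySem.List.pyRange 0 ((lines.length : Int) - 3) 1).map (fun y =>
              (if pvWin lines x y = PySem.List.slice pattern.toList none (some 4)
               then (1 : Int) else 0)
              + (if pvWin lines x y = PySem.List.slice pattern.toList.reverse none (some 4)
                 then (1 : Int) else 0))).sum)).sum := by
    unfold find_vertical_matches_alt
    rw [if_neg (by omega)]
    refine pv_double_foldl _ _ _ _ ?_
    intro cc x y
    simp only [pvWin]
    split_ifs <;> ring
  rw [hA, hB, pv_sum_sum_comm]
  refine congrArg List.sum (List.map_congr_left ?_)
  intro x _
  refine congrArg List.sum (List.map_congr_left ?_)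
  intro y hy
  obtain ⟨hy0, hyH⟩ := (PySem.List.mem_pyRange_one).mp hy
  rw [pv_hit_eq lines pattern.toList hP x y hy0 (by omega),
    pv_hit_eq lines pattern.toList.reverse (by simpa using hP) x y hy0 (by omega)]

theorem find_vertical_matches_spec : Claim_equal_find_vertical_matches := by
  intro lines pattern _ hpre
  unfold Spec_find_vertical_matches
  by_cases hH : lines.length < 4
  · -- short grid: both loops are empty / B early-returns 0
    simp [find_vertical_matches, find_vertical_matches_alt, hH,
      PySem.List.pyRange_one_eq_nil (show ((lines.length : Int) - 3) ≤ 0 by omega)]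
  · have hH4 : 4 ≤ lines.length := by omega
    by_cases hW : (PySem.List.pyGetD lines 0 "").toList.length = 0
    · -- empty first row: both x-loops are empty
      simp [find_vertical_matches, find_vertical_matches_alt, hH, hW]
    · have hP : 4 ≤ pattern.toList.length := by
        rcases hpre with h | h | ⟨h, _⟩ <;> omega
      exact pv_main lines pattern hH4 hP
-- ===== VERDICT (by name: the statement is the Claim_ definition above) =====
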